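-- pv_equiv track=rewrite | github.com/stuart-spackman/CST580-Topic1-Week1-Project1 | main.py | maze_to_array
-- ===== SOURCE A (Python) =====
-- def maze_to_array(maze, frontier=set(), visited=set(), path=None):
--     symbol_map = {
--         "#": 0,  # wall
--         ".": 1,  # empty space
--         "S": 2,  # start
--         "T": 3,  # treasure (goal)
--     }
--
--     rows, cols = len(maze), len(maze[0])
--     array = [[symbol_map.get(cell, 1) for cell in row] for row in maze]
--
--     # mark visited nodes in the array
--     for r, c in visited:
--         if maze[r][c] == ".":
--             array[r][c] = 4
--
--     # mark frontier (nodes about to be explored)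
--     for r, c in frontier:
--         if maze[r][c] == ".":
--             array[r][c] = 5
--
--     # mark final path if known
--     if path:
--         for r, c in path:
--             if maze[r][c] in {".", "S", "T"}:
--                 array[r][c] = 6
--
--     return array
-- ===== SOURCE B (Python) =====
-- def maze_to_array(maze, frontier=set(), visited=set(), path=None):
--     # filter each coordinate list up front into the set of cells it actually marks,
--     # then build every cell in a single grid pass with one read-side priority chain
--     # (path > frontier > visited > base); no intermediate array, no mutation
--     def marked(coords, symbols):
--         keep = set()
--         for r, c in coords:
--             if maze[r][c] in symbols:
--                 keep.add((r, c))
--         return keep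
--
--     path_marks = marked(path, (".", "S", "T")) if path else set()
--     frontier_marks = marked(frontier, (".",))
--     visited_marks = marked(visited, (".",))
--     result = []
--     for r, row in enumerate(maze):
--         out_row = []
--         for c, cell in enumerate(row):
--             if (r, c) in path_marks:
--                 out_row.append(6)
--             elif (r, c) in frontier_marks:
--                 out_row.append(5)
--             elif (r, c) in visited_marks:
--                 out_row.append(4)
--             else:
--                 out_row.append(0 if cell == "#" else 2 if cell == "S" else 3 if cell == "T" else 1)
--         result.append(out_row)
--     return result
-- ===== Notes on version B (the rewrite author's own statement) =====
-- stated objective: alternative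
-- what changed: Inverts the data flow: instead of A's base-grid comprehension (dict lookup per cell) followed by three overlay loops mutating array cells in place, B first filters each coordinate list into the set of cells it actually marks and then builds every cell in one grid-driven pass, choosing its value with a single read-side priority chain (path > frontier > visited > base conditional chain); no intermediate array, no mutation, no symbol dict.
-- outside the precondition, e.g. on maze_to_array(['..', '..'], set(), {(-1, 0)}, None): A returns [[1, 1], [4, 1]], B returns [[1, 1], [1, 1]]
import Mathlib
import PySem

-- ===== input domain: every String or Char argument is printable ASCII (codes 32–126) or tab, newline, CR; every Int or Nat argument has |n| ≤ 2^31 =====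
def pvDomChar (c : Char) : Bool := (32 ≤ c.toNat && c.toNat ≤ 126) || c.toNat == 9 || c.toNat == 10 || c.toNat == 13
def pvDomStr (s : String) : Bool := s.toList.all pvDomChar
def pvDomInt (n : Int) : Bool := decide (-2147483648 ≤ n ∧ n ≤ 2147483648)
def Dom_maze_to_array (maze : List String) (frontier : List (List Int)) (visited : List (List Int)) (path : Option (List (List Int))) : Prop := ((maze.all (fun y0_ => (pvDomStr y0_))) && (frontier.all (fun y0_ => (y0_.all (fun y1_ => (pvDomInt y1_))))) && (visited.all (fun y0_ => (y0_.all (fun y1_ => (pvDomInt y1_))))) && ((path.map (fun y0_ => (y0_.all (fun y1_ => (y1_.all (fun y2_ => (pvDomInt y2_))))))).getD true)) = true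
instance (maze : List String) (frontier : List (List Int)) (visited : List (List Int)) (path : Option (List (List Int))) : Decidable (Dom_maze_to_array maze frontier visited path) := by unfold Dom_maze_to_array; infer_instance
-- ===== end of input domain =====

-- B replaces A's base-grid map plus three in-place overlay loops by filtering the coordinate lists
-- into mark-sets up front and building each cell in a single grid pass with one priority chain.

-- ===== PORT A =====
-- maze[r][c] as Python computes it (none = IndexError; negative indices wrap)
def pvCharAt (maze : List String) (r c : Int) : Option Char :=
  (PySem.List.pyGet? maze r).bind (fun row => PySem.Str.pyGet? row c)

-- array[r][c] = v (total form of the assignment; inside Pre_ both indices are in range)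
def pvSet2 (a : List (List Int)) (r c : Int) (v : Int) : List (List Int) :=
  PySem.List.pySetD a r (PySem.List.pySetD (PySem.List.pyGetD a r []) c v)

-- loop body of 'for r, c in L: if <gate r c>: array[r][c] = v'
-- (an entry of length ≠ 2 is Python's ValueError on unpacking, outside Pre_)
def pvStep (G : Int → Int → Bool) (v : Int) (a : List (List Int)) (p : List Int) : List (List Int) :=
  match p with
  | [r, c] => if G r c then pvSet2 a r c v else a
  | _ => a

def pvSymbolMap : PySem.Dict Char Int := PySem.Dict.ofList [('#', 0), ('.', 1), ('S', 2), ('T', 3)]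

def maze_to_array (maze : List String) (frontier : List (List Int)) (visited : List (List Int)) (path : Option (List (List Int))) : List (List Int) :=
  -- rows, cols = len(maze), len(maze[0]) : both unused afterwards; maze[0] raises IndexError on maze = [] (excluded by Pre_)
  let array0 := maze.map (fun row => row.toList.map (fun cell => pvSymbolMap.getD cell 1))
  let a1 := visited.foldl (pvStep (fun r c => pvCharAt maze r c == some '.') 4) array0
  let a2 := frontier.foldl (pvStep (fun r c => pvCharAt maze r c == some '.') 5) a1
  match path with
  | some l =>
      if l.isEmpty then a2
      else l.foldl (pvStep (fun r c => decide (pvCharAt maze r c ∈ [some '.', some 'S', some 'T'])) 6) a2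
  | none => a2

-- ===== PORT B =====
-- 'path if path else []': the effective list behind "marked(path, …) if path else set()"
def pvPathList (path : Option (List (List Int))) : List (List Int) :=
  match path with
  | some l => if l.isEmpty then [] else l
  | none => []

-- helper 'marked(coords, symbols)': the set of coordinates whose cell is one of the symbols.
-- An entry of length ≠ 2 (unpacking ValueError) or out of range (IndexError) raises in Python: outside Pre_.
def pvMarkStep (maze : List String) (symbols : List Char) (keep : PySem.Set (Int × Int)) (p : List Int) : PySem.Set (Int × Int) :=
  match p with
  | [r, c] =>
      match pvCharAt maze r c with
      | some ch => if ch ∈ symbols then PySem.Set.add keep (r, c) else keep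
      | none => keep
  | _ => keep

def pvMarked (maze : List String) (symbols : List Char) (coords : List (List Int)) : PySem.Set (Int × Int) :=
  coords.foldl (pvMarkStep maze symbols) PySem.Set.empty

def maze_to_array_alt (maze : List String) (frontier : List (List Int)) (visited : List (List Int)) (path : Option (List (List Int))) : List (List Int) :=
  let pathMarks := pvMarked maze ['.', 'S', 'T'] (pvPathList path)
  let frontierMarks := pvMarked maze ['.'] frontier
  let visitedMarks := pvMarked maze ['.'] visited
  (PySem.List.enumerate maze 0).map (fun ri =>
    (PySem.List.enumerate ri.2.toList 0).map (fun cj =>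
      if PySem.Set.contains pathMarks (ri.1, cj.1) then 6
      else if PySem.Set.contains frontierMarks (ri.1, cj.1) then 5
      else if PySem.Set.contains visitedMarks (ri.1, cj.1) then 4
      else if cj.2 == '#' then 0 else if cj.2 == 'S' then 2 else if cj.2 == 'T' then 3 else 1))

-- ===== PRECONDITION & SPEC =====
def pvPairOK (maze : List String) (p : List Int) : Bool :=
  match p with
  | [r, c] => decide (0 ≤ r) && decide (r < (maze.length : Int)) && decide (0 ≤ c)
      && decide (c < (((maze.getD r.toNat "").toList.length : Nat) : Int))
  | _ => false

-- Pre_ excludes (a) the inputs on which A raises: an empty maze (IndexError on maze[0]), coordinate entries that are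
-- not length-2 lists (ValueError on unpacking) and out-of-range coordinates (IndexError); and (b) coordinates with a
-- negative in-(wraparound-)range component — maze coordinates are naturally non-negative, and there A's value comes
-- from Python's negative-index wraparound, outside the function's natural domain.
def Pre_maze_to_array (maze : List String) (frontier : List (List Int)) (visited : List (List Int)) (path : Option (List (List Int))) : Prop :=
  maze ≠ [] ∧ ∀ p ∈ visited ++ frontier ++ path.getD [], pvPairOK maze p = true

instance (maze : List String) (frontier : List (List Int)) (visited : List (List Int)) (path : Option (List (List Int))) : Decidable (Pre_maze_to_array maze frontier visited path) := by
  unfold Pre_maze_to_array; infer_instance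

def pvWitness_maze_to_array : List String × List (List Int) × List (List Int) × Option (List (List Int)) :=
  (["#.S", "T.."], [[1, 1]], [[0, 1]], some [[0, 2], [1, 0]])

def Spec_maze_to_array (maze : List String) (frontier : List (List Int)) (visited : List (List Int)) (path : Option (List (List Int))) (out : List (List Int)) : Prop := out = maze_to_array_alt maze frontier visited path
instance (maze : List String) (frontier : List (List Int)) (visited : List (List Int)) (path : Option (List (List Int))) (out : List (List Int)) : Decidable (Spec_maze_to_array maze frontier visited path out) := by unfold Spec_maze_to_array; infer_instance

-- ===== CLAIM (what is proved, stated in full; the proofs are below) =====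
def Claim_equal_maze_to_array : Prop := ∀ (maze : List String) (frontier : List (List Int)) (visited : List (List Int)) (path : Option (List (List Int))), Dom_maze_to_array maze frontier visited path → Pre_maze_to_array maze frontier visited path → Spec_maze_to_array maze frontier visited path (maze_to_array maze frontier visited path)

-- ===== LEMMAS AND PROOFS =====

-- cell value and row length with defaults, used to characterise both ports cell by cell
def pvAt (a : List (List Int)) (i j : Nat) : Int := (a.getD i []).getD j 0
def pvRowLen (a : List (List Int)) (i : Nat) : Nat := (a.getD i []).length
def pvMazeRow (maze : List String) (i : Nat) : List Char := (maze.getD i "").toList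

lemma pvSet2_char (a : List (List Int)) (n m : Nat) (v : Int) :
    pvSet2 a (n : Int) (m : Int) v = a.set n ((a.getD n []).set m v) := by
  simp [pvSet2]

lemma length_pvStep (G : Int → Int → Bool) (v : Int) (a : List (List Int)) (p : List Int) :
    (pvStep G v a p).length = a.length := by
  rcases p with _ | ⟨r, p⟩; · rfl
  rcases p with _ | ⟨c, p⟩; · rfl
  rcases p with _ | ⟨x, p⟩
  · simp only [pvStep, pvSet2]
    split_ifs <;> simp [PySem.List.length_pySetD]
  · rfl

lemma pvOK_shape (maze : List String) (p : List Int) (hok : pvPairOK maze p = true) :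
    ∃ n m : Nat, p = [(n : Int), (m : Int)] ∧ n < maze.length ∧ m < (pvMazeRow maze n).length := by
  rcases p with _ | ⟨r, p⟩; · simp [pvPairOK] at hok
  rcases p with _ | ⟨c, p⟩; · simp [pvPairOK] at hok
  rcases p with _ | ⟨x, p⟩
  · simp only [pvPairOK, Bool.and_eq_true, decide_eq_true_eq] at hok
    obtain ⟨⟨⟨hr0, hr1⟩, hc0⟩, hc1⟩ := hok
    refine ⟨r.toNat, c.toNat, ?_, ?_, ?_⟩
    · simp [Int.toNat_of_nonneg hr0, Int.toNat_of_nonneg hc0]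
    · omega
    · simp only [pvMazeRow]; omega
  · simp [pvPairOK] at hok

lemma pvRowLen_pvStep (maze : List String) (G : Int → Int → Bool) (v : Int) (a : List (List Int)) (p : List Int)
    (hok : pvPairOK maze p = true) (i : Nat) :
    pvRowLen (pvStep G v a p) i = pvRowLen a i := by
  obtain ⟨n, m, rfl, hn, hm⟩ := pvOK_shape maze p hok
  simp only [pvStep]
  split_ifs with hG
  · rw [pvSet2_char]
    simp only [pvRowLen, List.getD_eq_getElem?_getD, List.getElem?_set]
    by_cases h : n = i
    · subst h
      by_cases hlt : n < a.length
      · simp [hlt]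
      · simp [hlt]
    · simp [h]
  · rfl

lemma pvAt_pvStep (maze : List String) (G : Int → Int → Bool) (v : Int) (a : List (List Int)) (p : List Int)
    (hok : pvPairOK maze p = true)
    (hlen : a.length = maze.length)
    (hrow : ∀ i, pvRowLen a i = (pvMazeRow maze i).length)
    (i j : Nat) :
    pvAt (pvStep G v a p) i j =
      if p = [(i : Int), (j : Int)] ∧ G i j then v else pvAt a i j := by
  obtain ⟨n, m, rfl, hn, hm⟩ := pvOK_shape maze p hok
  simp only [pvStep]
  have hmlen : m < (a.getD n []).length := by
    have := hrow n; simp only [pvRowLen] at this; omega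
  split_ifs with hG hc hc
  · obtain ⟨he, _⟩ := hc
    have hni : n = i := by injection he with h1 h2; exact_mod_cast h1
    have hmj : m = j := by injection he with h1 h2; injection h2 with h3 _; exact_mod_cast h3
    subst hni hmj
    rw [pvSet2_char]
    simp only [pvAt, List.getD_eq_getElem?_getD, List.getElem?_set]
    have hna : n < a.length := by omega
    have hmlen' : m < a[n].length := by rwa [List.getD_eq_getElem a [] hna] at hmlen
    simp [hna, hmlen']
  · rw [pvSet2_char]
    simp only [pvAt, List.getD_eq_getElem?_getD, List.getElem?_set]
    by_cases hni : n = i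
    · subst hni
      have hmj : ¬ m = j := by
        intro h; subst h; exact hc ⟨rfl, hG⟩
      by_cases hna : n < a.length
      · simp [hna, hmj]
      · simp [hna]
    · simp [hni]
  · obtain ⟨he, hGij⟩ := hc
    have hni : n = i := by injection he with h1 _; exact_mod_cast h1
    have hmj : m = j := by injection he with _ h2; injection h2 with h3 _; exact_mod_cast h3
    subst hni hmj
    exact absurd hGij hG
  · rfl

lemma pvOverlay_foldl (maze : List String) (G : Int → Int → Bool) (v : Int) (L : List (List Int)) (a : List (List Int))
    (hL : ∀ p ∈ L, pvPairOK maze p = true)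
    (hlen : a.length = maze.length)
    (hrow : ∀ i, pvRowLen a i = (pvMazeRow maze i).length) :
    (L.foldl (pvStep G v) a).length = maze.length ∧
    (∀ i, pvRowLen (L.foldl (pvStep G v) a) i = (pvMazeRow maze i).length) ∧
    (∀ i j, pvAt (L.foldl (pvStep G v) a) i j =
        if [(i : Nat) , (j : Nat)].map (Int.ofNat) ∈ L ∧ G i j then v else pvAt a i j) := by
  induction L generalizing a with
  | nil => exact ⟨hlen, hrow, fun i j => by simp⟩
  | cons p L ih =>
    have hokp : pvPairOK maze p = true := hL p (List.mem_cons_self ..)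
    have hL' : ∀ q ∈ L, pvPairOK maze q = true := fun q hq => hL q (List.mem_cons_of_mem _ hq)
    have hlen' : (pvStep G v a p).length = maze.length := by rw [length_pvStep]; exact hlen
    have hrow' : ∀ i, pvRowLen (pvStep G v a p) i = (pvMazeRow maze i).length := fun i => by
      rw [pvRowLen_pvStep maze G v a p hokp]; exact hrow i
    obtain ⟨h1, h2, h3⟩ := ih (pvStep G v a p) hL' hlen' hrow'
    refine ⟨h1, h2, fun i j => ?_⟩
    rw [List.foldl_cons] at *
    rw [h3 i j, pvAt_pvStep maze G v a p hokp hlen hrow i j]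
    simp only [List.map, Int.ofNat_eq_natCast, List.mem_cons]
    by_cases hG : G i j
    · by_cases hmem : [(i : Int), (j : Int)] ∈ L
      · simp [hG, hmem]
      · by_cases hp : p = [(i : Int), (j : Int)]
        · simp [hG, hmem, hp]
        · simp [hG, hmem, hp, eq_comm]
    · simp [hG]

lemma pvCharAt_in_range (maze : List String) (i j : Nat) (hi : i < maze.length) (hj : j < (pvMazeRow maze i).length) :
    pvCharAt maze (i : Int) (j : Int) = some ((pvMazeRow maze i).getD j ' ') := by
  have hrow : maze.getD i "" = maze[i] := List.getD_eq_getElem maze "" hi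
  simp only [pvMazeRow, hrow] at hj ⊢
  simp [pvCharAt, pysem, List.getElem?_eq_getElem hi, List.getElem?_eq_getElem hj]

-- the symbol gate of 'marked', as a function of the coordinate
def pvGateB (maze : List String) (symbols : List Char) (q : Int × Int) : Bool :=
  match pvCharAt maze q.1 q.2 with
  | some ch => decide (ch ∈ symbols)
  | none => false

lemma mem_markStep (maze : List String) (symbols : List Char) (q : Int × Int)
    (s : PySem.Set (Int × Int)) (p : List Int) :
    q ∈ pvMarkStep maze symbols s p ↔ q ∈ s ∨ (p = [q.1, q.2] ∧ pvGateB maze symbols q = true) := by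
  rcases q with ⟨r0, c0⟩
  rcases p with _ | ⟨a, _ | ⟨b, _ | ⟨x, tl⟩⟩⟩
  · simp [pvMarkStep]
  · simp [pvMarkStep]
  · rcases hc : pvCharAt maze a b with _ | ch
    · simp only [pvMarkStep, hc]
      constructor
      · exact Or.inl
      · rintro (h | ⟨he, hg⟩)
        · exact h
        · exfalso
          injection he with h1 h2; injection h2 with h3 _
          subst h1; subst h3
          simp [pvGateB, hc] at hg
    · simp only [pvMarkStep, hc]
      by_cases hs : ch ∈ symbols
      · rw [if_pos hs]
        rw [PySem.Set.mem_add]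
        constructor
        · rintro (h | h)
          · exact Or.inl h
          · obtain ⟨h1, h2⟩ := Prod.mk.injEq .. ▸ h
            subst h1; subst h2
            exact Or.inr ⟨rfl, by simp [pvGateB, hc, hs]⟩
        · rintro (h | ⟨he, hg⟩)
          · exact Or.inl h
          · injection he with h1 h2; injection h2 with h3 _
            subst h1; subst h3
            exact Or.inr rfl
      · rw [if_neg hs]
        constructor
        · exact Or.inl
        · rintro (h | ⟨he, hg⟩)
          · exact h
          · exfalso
            injection he with h1 h2; injection h2 with h3 _
            subst h1; subst h3
            simp [pvGateB, hc, hs] at hg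
  · simp [pvMarkStep]

lemma mem_foldl_marked (maze : List String) (symbols : List Char) (q : Int × Int) :
    ∀ (L : List (List Int)) (s : PySem.Set (Int × Int)),
      q ∈ L.foldl (pvMarkStep maze symbols) s ↔
        q ∈ s ∨ ([q.1, q.2] ∈ L ∧ pvGateB maze symbols q = true) := by
  intro L
  induction L with
  | nil => intro s; simp
  | cons p L ih =>
    intro s
    rw [List.foldl_cons, ih, mem_markStep]
    simp only [List.mem_cons]
    constructor
    · rintro ((h | ⟨he, hg⟩) | ⟨hm, hg⟩)
      · exact Or.inl h
      · exact Or.inr ⟨Or.inl he.symm, hg⟩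
      · exact Or.inr ⟨Or.inr hm, hg⟩
    · rintro (h | ⟨he | hm, hg⟩)
      · exact Or.inl (Or.inl h)
      · exact Or.inl (Or.inr ⟨he.symm, hg⟩)
      · exact Or.inr ⟨hm, hg⟩

lemma contains_pvMarked (maze : List String) (symbols : List Char) (L : List (List Int)) (q : Int × Int) :
    PySem.Set.contains (pvMarked maze symbols L) q =
      (decide ([q.1, q.2] ∈ L) && pvGateB maze symbols q) := by
  rw [Bool.eq_iff_iff, PySem.Set.contains_iff, Bool.and_eq_true, decide_eq_true_eq]
  rw [pvMarked, mem_foldl_marked]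
  simp [PySem.Set.empty]

lemma mem_pvPathList (path : Option (List (List Int))) (x : List Int) :
    x ∈ pvPathList path ↔ x ∈ path.getD [] := by
  cases path with
  | none => simp [pvPathList]
  | some l =>
    by_cases hl : l.isEmpty
    · rw [List.isEmpty_iff] at hl; subst hl; simp [pvPathList]
    · simp [pvPathList, hl]

-- the base translation of a single cell, A's dict lookup vs B's conditional chain
lemma base_eq (ch : Char) :
    pvSymbolMap.getD ch 1 =
      if ch == '#' then 0 else if ch == 'S' then 2 else if ch == 'T' then 3 else (1 : Int) := by
  by_cases h0 : ch = '#'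
  · subst h0; decide
  · by_cases h1 : ch = '.'
    · subst h1; decide
    · by_cases h2 : ch = 'S'
      · subst h2; decide
      · by_cases h3 : ch = 'T'
        · subst h3; decide
        · have hm : pvSymbolMap.items = [('#', 0), ('.', 1), ('S', 2), ('T', 3)] := by decide
          have b0 : ('#' == ch) = false := by simp [Ne.symm h0]
          have b1 : ('.' == ch) = false := by simp [Ne.symm h1]
          have b2 : ('S' == ch) = false := by simp [Ne.symm h2]
          have b3 : ('T' == ch) = false := by simp [Ne.symm h3]
          simp [PySem.Dict.getD, PySem.Dict.get?, hm, List.find?, b0, b1, b2, b3, h0, h2, h3]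

lemma grid_ext (x y : List (List Int))
    (h1 : x.length = y.length)
    (h2 : ∀ i, pvRowLen x i = pvRowLen y i)
    (h3 : ∀ i j, i < x.length → j < pvRowLen x i → pvAt x i j = pvAt y i j) : x = y := by
  apply List.ext_getElem h1
  intro i hix hiy
  have hgx : x.getD i [] = x[i] := List.getD_eq_getElem x [] hix
  have hgy : y.getD i [] = y[i] := List.getD_eq_getElem y [] hiy
  apply List.ext_getElem
  · have := h2 i; simp only [pvRowLen, hgx, hgy] at this; exact this
  · intro j hjx hjy
    have := h3 i j hix (by simpa only [pvRowLen, hgx] using hjx)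
    simp only [pvAt, hgx, hgy, List.getD_eq_getElem _ _ hjx, List.getD_eq_getElem _ _ hjy] at this
    exact this

-- characterisation of port B, cell by cell
lemma alt_char (maze : List String) (frontier visited : List (List Int)) (path : Option (List (List Int))) :
    (maze_to_array_alt maze frontier visited path).length = maze.length ∧
    (∀ i, pvRowLen (maze_to_array_alt maze frontier visited path) i = (pvMazeRow maze i).length) ∧
    (∀ i j, i < maze.length → j < (pvMazeRow maze i).length →
      pvAt (maze_to_array_alt maze frontier visited path) i j =
        (let ch := (pvMazeRow maze i).getD j ' '
         if decide ([(i : Int), (j : Int)] ∈ pvPathList path) && pvGateB maze ['.', 'S', 'T'] ((i : Int), (j : Int)) then 6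
         else if decide ([(i : Int), (j : Int)] ∈ frontier) && pvGateB maze ['.'] ((i : Int), (j : Int)) then 5
         else if decide ([(i : Int), (j : Int)] ∈ visited) && pvGateB maze ['.'] ((i : Int), (j : Int)) then 4
         else if ch == '#' then 0 else if ch == 'S' then 2 else if ch == 'T' then 3 else 1)) := by
  refine ⟨by simp [maze_to_array_alt, PySem.List.length_enumerate], fun i => ?_, fun i j hi hj => ?_⟩
  · simp only [maze_to_array_alt, pvRowLen, pvMazeRow, List.getD_eq_getElem?_getD, List.getElem?_map]
    by_cases hi : i < maze.length
    · rw [PySem.List.getElem?_enumerate, List.getElem?_eq_getElem hi]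
      simp [PySem.List.length_enumerate]
    · rw [PySem.List.getElem?_enumerate, List.getElem?_eq_none (by omega : maze.length ≤ i)]
      rfl
  · have hrow : maze.getD i "" = maze[i] := List.getD_eq_getElem maze "" hi
    simp only [pvMazeRow, hrow] at hj ⊢
    simp only [maze_to_array_alt, pvAt, List.getD_eq_getElem?_getD, List.getElem?_map,
      PySem.List.getElem?_enumerate, List.getElem?_eq_getElem hi]
    simp only [Option.map_some, Option.getD_some, List.getElem?_map, PySem.List.getElem?_enumerate,
      List.getElem?_eq_getElem hj]
    simp only [contains_pvMarked, zero_add]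

-- ===== VERDICT (by name: the statement is the Claim_ definition above) =====
theorem maze_to_array_spec : Claim_equal_maze_to_array := by
  intro maze frontier visited path hdom hpre
  obtain ⟨hne, hall⟩ := hpre
  unfold Spec_maze_to_array
  have hv : ∀ p ∈ visited, pvPairOK maze p = true := fun p hp => hall p (by simp [hp])
  have hf : ∀ p ∈ frontier, pvPairOK maze p = true := fun p hp => hall p (by simp [hp])
  have hpth : ∀ p ∈ path.getD [], pvPairOK maze p = true := fun p hp => hall p (by simp [hp])
  -- base array
  set array0 := maze.map (fun row => row.toList.map (fun cell => pvSymbolMap.getD cell 1)) with harr0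
  have hlen0 : array0.length = maze.length := by simp [harr0]
  have hrow0 : ∀ i, pvRowLen array0 i = (pvMazeRow maze i).length := by
    intro i
    simp only [harr0, pvRowLen, pvMazeRow, List.getD_eq_getElem?_getD, List.getElem?_map]
    by_cases hi : i < maze.length
    · simp [List.getElem?_eq_getElem hi]
    · simp [List.getElem?_eq_none (by omega : maze.length ≤ i)]
  have hat0 : ∀ i j, i < maze.length → j < (pvMazeRow maze i).length →
      pvAt array0 i j = pvSymbolMap.getD ((pvMazeRow maze i).getD j ' ') 1 := by
    intro i j hi hj
    have hrow : maze.getD i "" = maze[i] := List.getD_eq_getElem maze "" hi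
    simp only [pvMazeRow, hrow] at hj ⊢
    simp only [harr0, pvAt, List.getD_eq_getElem?_getD, List.getElem?_map,
      List.getElem?_eq_getElem hi, Option.map_some, Option.getD_some,
      List.getElem?_map, List.getElem?_eq_getElem hj]
  -- overlays of port A
  obtain ⟨hl1, hr1, ha1⟩ := pvOverlay_foldl maze (fun r c => pvCharAt maze r c == some '.') 4 visited array0 hv hlen0 hrow0
  obtain ⟨hl2, hr2, ha2⟩ := pvOverlay_foldl maze (fun r c => pvCharAt maze r c == some '.') 5 frontier _ hf hl1 hr1
  obtain ⟨hl3, hr3, ha3⟩ := pvOverlay_foldl maze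
    (fun r c => decide (pvCharAt maze r c ∈ [some '.', some 'S', some 'T'])) 6 (path.getD []) _ hpth hl2 hr2
  -- port A equals the three chained folds over the effective path list
  have hAeq : maze_to_array maze frontier visited path =
      (path.getD []).foldl (pvStep (fun r c => decide (pvCharAt maze r c ∈ [some '.', some 'S', some 'T'])) 6)
        (frontier.foldl (pvStep (fun r c => pvCharAt maze r c == some '.') 5)
          (visited.foldl (pvStep (fun r c => pvCharAt maze r c == some '.') 4) array0)) := by
    unfold maze_to_array
    cases path with
    | none => rfl
    | some l =>
      by_cases hl : l.isEmpty
      · rw [List.isEmpty_iff] at hl; subst hl; rfl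
      · have hl' : l.isEmpty = false := by simpa using hl
        simp only [hl', Bool.false_eq_true, if_false]
        rfl
  obtain ⟨bl, br, bat⟩ := alt_char maze frontier visited path
  rw [hAeq]
  apply grid_ext
  · rw [hl3, bl]
  · intro i; rw [hr3 i, br i]
  · intro i j hi hj
    rw [hl3] at hi
    rw [hr3 i] at hj
    rw [bat i j hi hj]
    rw [ha3 i j, ha2 i j, ha1 i j, hat0 i j hi hj]
    have hchar := pvCharAt_in_range maze i j hi hj
    simp only [List.map, Int.ofNat_eq_natCast, mem_pvPathList, base_eq, pvGateB, hchar]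
    set ch := (pvMazeRow maze i).getD j ' ' with hch
    by_cases hp : [(i : Int), (j : Int)] ∈ path.getD [] <;>
      by_cases hfm : [(i : Int), (j : Int)] ∈ frontier <;>
        by_cases hvm : [(i : Int), (j : Int)] ∈ visited <;>
          by_cases hdot : ch = '.' <;>
            by_cases hS : ch = 'S' <;>
              by_cases hT : ch = 'T' <;>
                simp [hp, hfm, hvm, hdot, hS, hT]
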